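-- pv_equiv track=rewrite | github.com/DazzleTools/teeclip | teeclip/cli.py | parse_clear_selector
-- ===== SOURCE A (Python) =====
-- def parse_clear_selector(selector: str) -> list:
--     """Parse a clear selector string into a sorted list of 1-based indices.
--
--     Supports:
--         "3"       → [3]
--         "4:10"    → [4, 5, 6, 7, 8, 9, 10]
--         "2,4:10"  → [2, 4, 5, 6, 7, 8, 9, 10]
--         "1,3,5"   → [1, 3, 5]
--
--     Raises ValueError on invalid syntax.
--     """
--     indices = set()
--     for part in selector.split(","):
--         part = part.strip()
--         if not part:
--             continue
--         if ":" in part: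
--             pieces = part.split(":", 1)
--             try:
--                 start = int(pieces[0])
--                 end = int(pieces[1])
--             except ValueError:
--                 raise ValueError(
--                     f"invalid range: '{part}' (expected START:END)"
--                 )
--             if start < 1 or end < 1:
--                 raise ValueError(
--                     f"indices must be positive: '{part}'"
--                 )
--             if start > end:
--                 raise ValueError(
--                     f"invalid range: '{part}' (start > end)"
--                 )
--             indices.update(range(start, end + 1))
--         else:
--             try:
--                 idx = int(part)
--             except ValueError:
--                 raise ValueError(
--                     f"invalid index: '{part}' (expected a number)"
--                 )
--             if idx < 1:
--                 raise ValueError(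
--                     f"indices must be positive: '{part}'"
--                 )
--             indices.add(idx)
--
--     if not indices:
--         raise ValueError("empty selector")
--
--     return sorted(indices)
-- ===== SOURCE B (Python) =====
-- def parse_clear_selector(selector: str) -> list:
--     """Parse a clear selector string into a sorted list of 1-based indices.
--
--     Collects validated (start, end) intervals in one pass, then sorts the
--     intervals by start and merges overlapping/adjacent runs, emitting each
--     merged run's range directly (no set, no final sort of indices).
--     """
--     intervals = []
--     for part in selector.split(","):
--         part = part.strip()
--         if not part:
--             continue
--         if ":" in part:
--             pieces = part.split(":", 1)
--             try:
--                 start = int(pieces[0])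
--                 end = int(pieces[1])
--             except ValueError:
--                 raise ValueError(
--                     f"invalid range: '{part}' (expected START:END)"
--                 )
--             if start < 1 or end < 1:
--                 raise ValueError(
--                     f"indices must be positive: '{part}'"
--                 )
--             if start > end:
--                 raise ValueError(
--                     f"invalid range: '{part}' (start > end)"
--                 )
--             intervals.append((start, end))
--         else:
--             try:
--                 idx = int(part)
--             except ValueError:
--                 raise ValueError(
--                     f"invalid index: '{part}' (expected a number)"
--                 )
--             if idx < 1:
--                 raise ValueError(
--                     f"indices must be positive: '{part}'"
--                 )
--             intervals.append((idx, idx))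
--
--     if not intervals:
--         raise ValueError("empty selector")
--
--     intervals.sort(key=lambda iv: iv[0])
--     result = []
--     cur_lo, cur_hi = intervals[0]
--     for lo, hi in intervals[1:]:
--         if lo <= cur_hi + 1:
--             if hi > cur_hi:
--                 cur_hi = hi
--         else:
--             result.extend(range(cur_lo, cur_hi + 1))
--             cur_lo, cur_hi = lo, hi
--     result.extend(range(cur_lo, cur_hi + 1))
--     return result
-- ===== Notes on version B (the rewrite author's own statement) =====
-- stated objective: alternative
-- what changed: B collects validated (start,end) intervals in one pass, sorts the intervals by start and merges overlapping/adjacent runs, emitting each merged run's range directly, instead of A's accumulating every index in a set and sorting the index set at the end.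
import Mathlib
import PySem

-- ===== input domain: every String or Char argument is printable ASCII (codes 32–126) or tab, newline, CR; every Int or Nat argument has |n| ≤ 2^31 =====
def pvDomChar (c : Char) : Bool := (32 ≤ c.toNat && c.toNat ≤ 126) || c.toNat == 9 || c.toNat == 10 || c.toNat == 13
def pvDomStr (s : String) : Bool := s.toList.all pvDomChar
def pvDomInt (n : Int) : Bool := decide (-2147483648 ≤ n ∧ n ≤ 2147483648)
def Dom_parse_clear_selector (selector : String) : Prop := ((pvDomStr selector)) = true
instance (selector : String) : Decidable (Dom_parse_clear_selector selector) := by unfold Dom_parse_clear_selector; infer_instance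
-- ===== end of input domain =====

-- B replaces A's set-accumulate-then-sort with one validation pass collecting (start, end)
-- intervals, a sort of the intervals by start, and a merge of overlapping/adjacent runs
-- (objective: alternative; same return value on every input where A returns).

-- ===== PORT A =====
-- Wherever the Python raises ValueError the port keeps the accumulator unchanged / returns
-- a default; exactly those inputs are excluded by Pre_parse_clear_selector.
def pcsStepA (S : PySem.Set Int) (part0 : List Char) : PySem.Set Int :=
  let part := PySem.Chars.strip part0
  if part = [] then S
  else if PySem.Chars.isIn [':'] part then
    let pieces := PySem.Chars.splitOnMax part [':'] 1
    match PySem.Int.ofChars? (pieces.getD 0 []), PySem.Int.ofChars? (pieces.getD 1 []) with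
    | some start, some stop =>
      if start < 1 ∨ stop < 1 then S          -- raise "indices must be positive"
      else if start > stop then S             -- raise "invalid range (start > end)"
      else S.update (PySem.List.pyRange start (stop + 1))
    | _, _ => S                               -- raise "invalid range (expected START:END)"
  else
    match PySem.Int.ofChars? part with
    | some idx => if idx < 1 then S else S.add idx   -- raise "indices must be positive"
    | none => S                               -- raise "invalid index"

def parse_clear_selector (selector : String) : List Int :=
  let indices := (PySem.Chars.splitOn selector.toList [',']).foldl pcsStepA PySem.Set.empty
  -- "if not indices: raise ValueError('empty selector')" — excluded by Pre_
  PySem.List.sorted indices id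

-- ===== PORT B =====
def pcsStepB (ivs : List (Int × Int)) (part0 : List Char) : List (Int × Int) :=
  let part := PySem.Chars.strip part0
  if part = [] then ivs
  else if PySem.Chars.isIn [':'] part then
    let pieces := PySem.Chars.splitOnMax part [':'] 1
    match PySem.Int.ofChars? (pieces.getD 0 []), PySem.Int.ofChars? (pieces.getD 1 []) with
    | some start, some stop =>
      if start < 1 ∨ stop < 1 then ivs
      else if start > stop then ivs
      else ivs ++ [(start, stop)]
    | _, _ => ivs
  else
    match PySem.Int.ofChars? part with
    | some idx => if idx < 1 then ivs else ivs ++ [(idx, idx)]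
    | none => ivs

def pcsMergeStep (st : List Int × Int × Int) (iv : Int × Int) : List Int × Int × Int :=
  let (res, clo, chi) := st
  if iv.1 ≤ chi + 1 then
    if iv.2 > chi then (res, clo, iv.2) else (res, clo, chi)
  else (res ++ PySem.List.pyRange clo (chi + 1), iv.1, iv.2)

def parse_clear_selector_alt (selector : String) : List Int :=
  let ivs := (PySem.Chars.splitOn selector.toList [',']).foldl pcsStepB []
  match PySem.List.sorted ivs (·.1) with
  | [] => []                                  -- "empty selector": excluded by Pre_
  | iv0 :: rest =>
    let st := rest.foldl pcsMergeStep ([], iv0.1, iv0.2)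
    st.1 ++ PySem.List.pyRange st.2.1 (st.2.2 + 1)

-- ===== PRECONDITION & SPEC =====
-- Pre_ admits exactly the inputs on which the Python A returns normally: every
-- comma-separated part is (after stripping) empty or a valid positive index or a valid
-- positive nonempty range, and at least one part is nonempty.
def pcsPartOK (part0 : List Char) : Bool :=
  let part := PySem.Chars.strip part0
  if part = [] then true
  else if PySem.Chars.isIn [':'] part then
    let pieces := PySem.Chars.splitOnMax part [':'] 1
    match PySem.Int.ofChars? (pieces.getD 0 []), PySem.Int.ofChars? (pieces.getD 1 []) with
    | some start, some stop => decide (1 ≤ start ∧ 1 ≤ stop ∧ start ≤ stop)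
    | _, _ => false
  else
    match PySem.Int.ofChars? part with
    | some idx => decide (1 ≤ idx)
    | none => false

def Pre_parse_clear_selector (selector : String) : Prop :=
  ((PySem.Chars.splitOn selector.toList [',']).all pcsPartOK = true) ∧
  ((PySem.Chars.splitOn selector.toList [',']).any
      (fun p => !(PySem.Chars.strip p).isEmpty) = true)

instance (selector : String) : Decidable (Pre_parse_clear_selector selector) := by
  unfold Pre_parse_clear_selector; infer_instance

def pvWitness_parse_clear_selector : String := "2, 4:10 ,7"

def Spec_parse_clear_selector (selector : String) (out : List Int) : Prop :=
  out = parse_clear_selector_alt selector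
instance (selector : String) (out : List Int) : Decidable (Spec_parse_clear_selector selector out) := by
  unfold Spec_parse_clear_selector; infer_instance

-- ===== CLAIM (what is proved, stated in full; the proofs are below) =====
def Claim_equal_parse_clear_selector : Prop :=
  ∀ (selector : String), Dom_parse_clear_selector selector →
    Pre_parse_clear_selector selector →
    Spec_parse_clear_selector selector (parse_clear_selector selector)

-- ===== LEMMAS AND PROOFS =====

theorem pcsPyRange_nil {a b : Int} (h : b ≤ a) : PySem.List.pyRange a b = [] :=
  PySem.List.pyRange_one_eq_nil h

theorem pcsPyRange_pairwise (a b : Int) : (PySem.List.pyRange a b).Pairwise (· < ·) := by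
  obtain ⟨n, hn⟩ : ∃ n : Nat, (b - a).toNat = n := ⟨_, rfl⟩
  induction n generalizing a with
  | zero => rw [pcsPyRange_nil (by omega)]; exact List.Pairwise.nil
  | succ n ih =>
    by_cases h : a < b
    · rw [PySem.List.pyRange_one_cons h]
      refine List.Pairwise.cons ?_ (ih (a + 1) (by omega))
      intro x hx
      have := PySem.List.mem_pyRange_one.mp hx
      omega
    · rw [pcsPyRange_nil (by omega)]; exact List.Pairwise.nil

-- B's first pass only appends
theorem pcsStepB_append (ivs : List (Int × Int)) (p : List Char) :
    pcsStepB ivs p = ivs ++ pcsStepB [] p := by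
  simp only [pcsStepB]
  repeat' split
  all_goals simp

theorem pcsFoldB_append (parts : List (List Char)) (ivs : List (Int × Int)) :
    parts.foldl pcsStepB ivs = ivs ++ parts.foldl pcsStepB [] := by
  induction parts generalizing ivs with
  | nil => simp
  | cons p ps ih =>
    simp only [List.foldl_cons]
    rw [pcsStepB_append ivs p, ih (ivs ++ pcsStepB [] p), ih (pcsStepB [] p)]
    simp

-- per-part agreement of A's set step with B's interval step
theorem pcsStep_mem (S : PySem.Set Int) (p : List Char) (h : pcsPartOK p = true) (x : Int) :
    x ∈ pcsStepA S p ↔ x ∈ S ∨ ∃ iv ∈ pcsStepB [] p, iv.1 ≤ x ∧ x ≤ iv.2 := by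
  simp only [pcsStepA, pcsStepB]
  simp only [pcsPartOK] at h
  by_cases hp : PySem.Chars.strip p = []
  · simp [hp]
  · simp only [hp, if_false] at h ⊢
    by_cases hc : PySem.Chars.isIn [':'] (PySem.Chars.strip p) = true
    · simp only [hc, if_true] at h ⊢
      cases h1 : PySem.Int.ofChars? ((PySem.Chars.splitOnMax (PySem.Chars.strip p) [':'] 1).getD 0 []) with
      | none => simp only [h1] at h; simp at h
      | some start =>
        cases h2 : PySem.Int.ofChars? ((PySem.Chars.splitOnMax (PySem.Chars.strip p) [':'] 1).getD 1 []) with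
        | none => simp only [h1, h2] at h; simp at h
        | some stop =>
          simp only [h1, h2] at h ⊢
          simp only [decide_eq_true_eq] at h
          have hs1 : ¬(start < 1 ∨ stop < 1) := by omega
          have hs2 : ¬(start > stop) := by omega
          simp only [if_neg hs1, if_neg hs2, List.nil_append, PySem.Set.mem_update,
            List.mem_singleton, PySem.List.mem_pyRange_one]
          constructor
          · rintro (hx | hx)
            · exact Or.inl hx
            · exact Or.inr ⟨(start, stop), rfl, by simp; omega⟩
          · rintro (hx | ⟨iv, rfl, hle⟩)
            · exact Or.inl hx
            · simp at hle; exact Or.inr (by omega)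
    · simp only [hc, if_false, Bool.false_eq_true] at h ⊢
      cases h1 : PySem.Int.ofChars? (PySem.Chars.strip p) with
      | none => simp only [h1] at h; simp at h
      | some idx =>
        simp only [h1] at h ⊢
        simp only [decide_eq_true_eq] at h
        have hs1 : ¬(idx < 1) := by omega
        simp only [if_neg hs1, List.nil_append, PySem.Set.mem_add, List.mem_singleton]
        constructor
        · rintro (hx | hx)
          · exact Or.inl hx
          · exact Or.inr ⟨(idx, idx), rfl, by simp; omega⟩
        · rintro (hx | ⟨iv, rfl, hle⟩)
          · exact Or.inl hx
          · simp at hle; exact Or.inr (by omega)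

theorem pcsStepA_nodup (S : PySem.Set Int) (p : List Char) (h : S.Nodup) :
    (pcsStepA S p).Nodup := by
  simp only [pcsStepA]
  repeat' split
  all_goals first
    | exact h
    | exact PySem.Set.nodup_update _ _ h
    | exact PySem.Set.nodup_add _ _ h

theorem pcsStepB_wf (p : List Char) (h : pcsPartOK p = true) :
    ∀ iv ∈ pcsStepB [] p, iv.1 ≤ iv.2 := by
  simp only [pcsStepB]
  simp only [pcsPartOK] at h
  intro iv hiv
  by_cases hp : PySem.Chars.strip p = []
  · simp [hp] at hiv
  · simp only [hp, if_false] at h hiv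
    by_cases hc : PySem.Chars.isIn [':'] (PySem.Chars.strip p) = true
    · simp only [hc, if_true] at h hiv
      cases h1 : PySem.Int.ofChars? ((PySem.Chars.splitOnMax (PySem.Chars.strip p) [':'] 1).getD 0 []) with
      | none => simp only [h1] at h; simp at h
      | some start =>
        cases h2 : PySem.Int.ofChars? ((PySem.Chars.splitOnMax (PySem.Chars.strip p) [':'] 1).getD 1 []) with
        | none => simp only [h1, h2] at h; simp at h
        | some stop =>
          simp only [h1, h2] at h hiv
          simp only [decide_eq_true_eq] at h
          have hs1 : ¬(start < 1 ∨ stop < 1) := by omega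
          have hs2 : ¬(start > stop) := by omega
          simp only [if_neg hs1, if_neg hs2, List.nil_append, List.mem_singleton] at hiv
          subst hiv; exact h.2.2
    · simp only [hc, if_false, Bool.false_eq_true] at h hiv
      cases h1 : PySem.Int.ofChars? (PySem.Chars.strip p) with
      | none => simp only [h1] at h; simp at h
      | some idx =>
        simp only [h1] at h hiv
        simp only [decide_eq_true_eq] at h
        have hs1 : ¬(idx < 1) := by omega
        simp only [if_neg hs1, List.nil_append, List.mem_singleton] at hiv
        subst hiv; exact le_refl _

theorem pcsStepB_nonempty (p : List Char) (h : pcsPartOK p = true)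
    (hne : PySem.Chars.strip p ≠ []) : pcsStepB [] p ≠ [] := by
  simp only [pcsStepB]
  simp only [pcsPartOK] at h
  simp only [hne, if_false] at h ⊢
  by_cases hc : PySem.Chars.isIn [':'] (PySem.Chars.strip p) = true
  · simp only [hc, if_true] at h ⊢
    cases h1 : PySem.Int.ofChars? ((PySem.Chars.splitOnMax (PySem.Chars.strip p) [':'] 1).getD 0 []) with
    | none => simp only [h1] at h; simp at h
    | some start =>
      cases h2 : PySem.Int.ofChars? ((PySem.Chars.splitOnMax (PySem.Chars.strip p) [':'] 1).getD 1 []) with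
      | none => simp only [h1, h2] at h; simp at h
      | some stop =>
        simp only [h1, h2] at h ⊢
        simp only [decide_eq_true_eq] at h
        have hs1 : ¬(start < 1 ∨ stop < 1) := by omega
        have hs2 : ¬(start > stop) := by omega
        simp [hs1, hs2]
  · simp only [hc, if_false, Bool.false_eq_true] at h ⊢
    cases h1 : PySem.Int.ofChars? (PySem.Chars.strip p) with
    | none => simp only [h1] at h; simp at h
    | some idx =>
      simp only [h1] at h ⊢
      simp only [decide_eq_true_eq] at h
      have hs1 : ¬(idx < 1) := by omega
      simp [hs1]

theorem pcsFoldA_mem (parts : List (List Char)) (S : PySem.Set Int)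
    (h : parts.all pcsPartOK = true) (x : Int) :
    x ∈ parts.foldl pcsStepA S ↔
      x ∈ S ∨ ∃ iv ∈ parts.foldl pcsStepB [], iv.1 ≤ x ∧ x ≤ iv.2 := by
  induction parts generalizing S with
  | nil => simp
  | cons p ps ih =>
    simp only [List.all_cons, Bool.and_eq_true] at h
    simp only [List.foldl_cons]
    rw [ih (pcsStepA S p) h.2, pcsFoldB_append ps (pcsStepB [] p)]
    rw [pcsStep_mem S p h.1 x]
    constructor
    · rintro ((hx | ⟨iv, hiv, hle⟩) | ⟨iv, hiv, hle⟩)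
      · exact Or.inl hx
      · exact Or.inr ⟨iv, List.mem_append_left _ hiv, hle⟩
      · exact Or.inr ⟨iv, List.mem_append_right _ hiv, hle⟩
    · rintro (hx | ⟨iv, hiv, hle⟩)
      · exact Or.inl (Or.inl hx)
      · rcases List.mem_append.mp hiv with hm | hm
        · exact Or.inl (Or.inr ⟨iv, hm, hle⟩)
        · exact Or.inr ⟨iv, hm, hle⟩

theorem pcsFoldA_nodup (parts : List (List Char)) (S : PySem.Set Int) (h : S.Nodup) :
    (parts.foldl pcsStepA S).Nodup := by
  induction parts generalizing S with
  | nil => exact h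
  | cons p ps ih => exact ih _ (pcsStepA_nodup S p h)

theorem pcsFoldB_wf (parts : List (List Char)) (h : parts.all pcsPartOK = true) :
    ∀ iv ∈ parts.foldl pcsStepB [], iv.1 ≤ iv.2 := by
  induction parts with
  | nil => simp
  | cons p ps ih =>
    simp only [List.all_cons, Bool.and_eq_true] at h
    intro iv hiv
    simp only [List.foldl_cons] at hiv
    rw [pcsFoldB_append ps (pcsStepB [] p)] at hiv
    rcases List.mem_append.mp hiv with hm | hm
    · exact pcsStepB_wf p h.1 iv hm
    · exact ih h.2 iv hm

theorem pcsFoldB_nonempty (parts : List (List Char)) (h : parts.all pcsPartOK = true)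
    (hne : parts.any (fun p => !(PySem.Chars.strip p).isEmpty) = true) :
    parts.foldl pcsStepB [] ≠ [] := by
  induction parts with
  | nil => simp at hne
  | cons p ps ih =>
    simp only [List.all_cons, Bool.and_eq_true] at h
    simp only [List.foldl_cons]
    rw [pcsFoldB_append ps (pcsStepB [] p)]
    simp only [List.any_cons, Bool.or_eq_true] at hne
    intro hcontra
    rcases hne with hne | hne
    · exact pcsStepB_nonempty p h.1 (by simpa [List.isEmpty_iff] using hne)
        (List.append_eq_nil_iff.mp hcontra).1
    · exact ih h.2 hne (List.append_eq_nil_iff.mp hcontra).2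

-- merge-loop invariant
theorem pcsMerge_inv (rest : List (Int × Int)) :
    ∀ (res : List Int) (clo chi : Int),
    res.Pairwise (· < ·) →
    (∀ x ∈ res, x < clo) →
    clo ≤ chi →
    (∀ iv ∈ rest, clo ≤ iv.1 ∧ iv.1 ≤ iv.2) →
    rest.Pairwise (fun a b => a.1 ≤ b.1) →
    (((rest.foldl pcsMergeStep (res, clo, chi)).1 ++
        PySem.List.pyRange (rest.foldl pcsMergeStep (res, clo, chi)).2.1
          ((rest.foldl pcsMergeStep (res, clo, chi)).2.2 + 1)).Pairwise (· < ·)) ∧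
    (∀ x : Int,
      x ∈ (rest.foldl pcsMergeStep (res, clo, chi)).1 ++
        PySem.List.pyRange (rest.foldl pcsMergeStep (res, clo, chi)).2.1
          ((rest.foldl pcsMergeStep (res, clo, chi)).2.2 + 1) ↔
      (x ∈ res ∨ (clo ≤ x ∧ x ≤ chi) ∨ ∃ iv ∈ rest, iv.1 ≤ x ∧ x ≤ iv.2)) := by
  induction rest with
  | nil =>
    intro res clo chi h1 h2 h3 _ _
    simp only [List.foldl_nil]
    constructor
    · refine List.pairwise_append.mpr ⟨h1, pcsPyRange_pairwise _ _, ?_⟩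
      intro a ha b hb
      have hb' := PySem.List.mem_pyRange_one.mp hb
      have := h2 a ha
      omega
    · intro x
      simp only [List.mem_append, PySem.List.mem_pyRange_one]
      constructor
      · rintro (hx | hx)
        · exact Or.inl hx
        · exact Or.inr (Or.inl (by omega))
      · rintro (hx | hx | ⟨iv, hiv, _⟩)
        · exact Or.inl hx
        · exact Or.inr (by omega)
        · exact absurd hiv (List.not_mem_nil)
  | cons iv rest ih =>
    intro res clo chi h1 h2 h3 h4 h5
    have hhead := h4 iv (List.mem_cons_self)
    have htail : ∀ iv' ∈ rest, iv.1 ≤ iv'.1 := by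
      intro iv' hiv'
      exact (List.pairwise_cons.mp h5).1 iv' hiv'
    have h5' := (List.pairwise_cons.mp h5).2
    simp only [List.foldl_cons, pcsMergeStep]
    by_cases hle : iv.1 ≤ chi + 1
    · rw [if_pos hle]
      by_cases hgt : iv.2 > chi
      · rw [if_pos hgt]
        obtain ⟨hpw, hmem⟩ := ih res clo iv.2 h1 h2 (by omega)
          (fun iv' hiv' => ⟨by have := htail iv' hiv'; omega, (h4 iv' (List.mem_cons_of_mem _ hiv')).2⟩) h5'
        refine ⟨hpw, ?_⟩
        intro x
        rw [hmem x]
        constructor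
        · rintro (hx | hx | ⟨iv', hiv', hle'⟩)
          · exact Or.inl hx
          · by_cases hxc : x ≤ chi
            · exact Or.inr (Or.inl (by omega))
            · exact Or.inr (Or.inr ⟨iv, List.mem_cons_self, by omega⟩)
          · exact Or.inr (Or.inr ⟨iv', List.mem_cons_of_mem _ hiv', hle'⟩)
        · rintro (hx | hx | ⟨iv', hiv', hle'⟩)
          · exact Or.inl hx
          · exact Or.inr (Or.inl (by omega))
          · rcases List.mem_cons.mp hiv' with rfl | hm
            · exact Or.inr (Or.inl (by omega))
            · exact Or.inr (Or.inr ⟨iv', hm, hle'⟩)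
      · rw [if_neg hgt]
        obtain ⟨hpw, hmem⟩ := ih res clo chi h1 h2 h3
          (fun iv' hiv' => ⟨by have := htail iv' hiv'; omega, (h4 iv' (List.mem_cons_of_mem _ hiv')).2⟩) h5'
        refine ⟨hpw, ?_⟩
        intro x
        rw [hmem x]
        constructor
        · rintro (hx | hx | ⟨iv', hiv', hle'⟩)
          · exact Or.inl hx
          · exact Or.inr (Or.inl hx)
          · exact Or.inr (Or.inr ⟨iv', List.mem_cons_of_mem _ hiv', hle'⟩)
        · rintro (hx | hx | ⟨iv', hiv', hle'⟩)
          · exact Or.inl hx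
          · exact Or.inr (Or.inl hx)
          · rcases List.mem_cons.mp hiv' with rfl | hm
            · exact Or.inr (Or.inl (by omega))
            · exact Or.inr (Or.inr ⟨iv', hm, hle'⟩)
    · rw [if_neg hle]
      have hres' : ∀ y ∈ res ++ PySem.List.pyRange clo (chi + 1), y < iv.1 := by
        intro y hy
        rcases List.mem_append.mp hy with hm | hm
        · have := h2 y hm; omega
        · have := PySem.List.mem_pyRange_one.mp hm; omega
      obtain ⟨hpw, hmem⟩ := ih (res ++ PySem.List.pyRange clo (chi + 1)) iv.1 iv.2
        (List.pairwise_append.mpr ⟨h1, pcsPyRange_pairwise _ _, by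
          intro a ha b hb
          have := h2 a ha
          have := PySem.List.mem_pyRange_one.mp hb
          omega⟩)
        hres' hhead.2
        (fun iv' hiv' => ⟨htail iv' hiv', (h4 iv' (List.mem_cons_of_mem _ hiv')).2⟩) h5'
      refine ⟨hpw, ?_⟩
      intro x
      rw [hmem x]
      constructor
      · rintro (hx | hx | ⟨iv', hiv', hle'⟩)
        · rcases List.mem_append.mp hx with hm | hm
          · exact Or.inl hm
          · exact Or.inr (Or.inl (by have := PySem.List.mem_pyRange_one.mp hm; omega))
        · exact Or.inr (Or.inr ⟨iv, List.mem_cons_self, hx⟩)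
        · exact Or.inr (Or.inr ⟨iv', List.mem_cons_of_mem _ hiv', hle'⟩)
      · rintro (hx | hx | ⟨iv', hiv', hle'⟩)
        · exact Or.inl (List.mem_append_left _ hx)
        · exact Or.inl (List.mem_append_right _ (PySem.List.mem_pyRange_one.mpr (by omega)))
        · rcases List.mem_cons.mp hiv' with rfl | hm
          · exact Or.inr (Or.inl hle')
          · exact Or.inr (Or.inr ⟨iv', hm, hle'⟩)

-- ===== VERDICT (by name: the statement is the Claim_ definition above) =====
theorem parse_clear_selector_spec : Claim_equal_parse_clear_selector := by
  intro selector _ hpre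
  obtain ⟨hall, hany⟩ := hpre
  unfold Spec_parse_clear_selector parse_clear_selector parse_clear_selector_alt
  set parts := PySem.Chars.splitOn selector.toList [','] with hparts
  set ivs := parts.foldl pcsStepB [] with hivs
  have hwf := pcsFoldB_wf parts hall
  have hne : ivs ≠ [] := pcsFoldB_nonempty parts hall hany
  have hperm : (PySem.List.sorted ivs (·.1)).Perm ivs := PySem.List.sorted_perm ivs _ _
  cases hL : PySem.List.sorted ivs (·.1) with
  | nil => exact absurd ((hL ▸ hperm).nil_eq).symm hne
  | cons iv0 rest =>
    rw [hL] at hperm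
    have hmemL : ∀ iv, iv ∈ iv0 :: rest ↔ iv ∈ ivs := fun iv => hperm.mem_iff
    have h0 : iv0.1 ≤ iv0.2 := hwf iv0 ((hmemL iv0).mp List.mem_cons_self)
    have hpwL : (iv0 :: rest).Pairwise (fun a b => a.1 ≤ b.1) := by
      have := PySem.List.sorted_pairwise ivs (·.1)
      rw [hL] at this
      exact this
    obtain ⟨hpw, hmem⟩ := pcsMerge_inv rest [] iv0.1 iv0.2 List.Pairwise.nil (by simp) h0
      (fun iv hiv => ⟨(List.pairwise_cons.mp hpwL).1 iv hiv,
        hwf iv ((hmemL iv).mp (List.mem_cons_of_mem _ hiv))⟩)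
      (List.pairwise_cons.mp hpwL).2
    dsimp only
    rw [hL]
    apply PySem.List.sorted_eq_of_perm_of_pairwise_lt
    · refine (List.perm_ext_iff_of_nodup (List.Pairwise.imp (fun h => Int.ne_of_lt h) hpw)
        (pcsFoldA_nodup parts PySem.Set.empty List.nodup_nil)).mpr ?_
      intro a
      rw [hmem a, pcsFoldA_mem parts PySem.Set.empty hall a]
      constructor
      · rintro (ha | ha | ⟨iv, hiv, hle⟩)
        · exact absurd ha (List.not_mem_nil)
        · exact Or.inr ⟨iv0, (hmemL iv0).mp List.mem_cons_self, ha⟩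
        · exact Or.inr ⟨iv, (hmemL iv).mp (List.mem_cons_of_mem _ hiv), hle⟩
      · rintro (ha | ⟨iv, hiv, hle⟩)
        · exact absurd ha (List.not_mem_nil)
        · rcases List.mem_cons.mp ((hmemL iv).mpr hiv) with rfl | hm
          · exact Or.inr (Or.inl hle)
          · exact Or.inr (Or.inr ⟨iv, hm, hle⟩)
    · exact hpw
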